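-- pv_equiv track=rewrite | github.com/Ciphey/Ciphey | ciphey/Decryptor/basicEncryption/freqAnalysis.py | englishFreqMatchScore
-- ===== SOURCE A (Python) =====
-- ETAOIN = "ETAOINSHRDLCUMWFGYPBVKJXQZ"
--
-- LETTERS = "ABCDEFGHIJKLMNOPQRSTUVWXYZ"
--
-- def getLetterCount(message):
--     # Returns a dictionary with keys of single letters and values of the
--     # count of how many times they appear in the message parameter:
--     letterCount = {
--         "A": 0,
--         "B": 0,
--         "C": 0,
--         "D": 0,
--         "E": 0,
--         "F": 0,
--         "G": 0,
--         "H": 0,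
--         "I": 0,
--         "J": 0,
--         "K": 0,
--         "L": 0,
--         "M": 0,
--         "N": 0,
--         "O": 0,
--         "P": 0,
--         "Q": 0,
--         "R": 0,
--         "S": 0,
--         "T": 0,
--         "U": 0,
--         "V": 0,
--         "W": 0,
--         "X": 0,
--         "Y": 0,
--         "Z": 0,
--     }
--
--     for letter in message.upper():
--         if letter in LETTERS:
--             letterCount[letter] += 1
--
--     return letterCount
--
-- def getItemAtIndexZero(items):
--     return items[0]
--
-- def getFrequencyOrder(message):
--     # Returns a string of the alphabet letters arranged in order of most
--     # frequently occurring in the message parameter.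
--
--     # First, get a dictionary of each letter and its frequency count:
--     letterToFreq = getLetterCount(message)
--
--     # Second, make a dictionary of each frequency count to each letter(s)
--     # with that frequency:
--     freqToLetter = {}
--     for letter in LETTERS:
--         if letterToFreq[letter] not in freqToLetter:
--             freqToLetter[letterToFreq[letter]] = [letter]
--         else:
--             freqToLetter[letterToFreq[letter]].append(letter)
--
--     # Third, put each list of letters in reverse "ETAOIN" order, and then
--     # convert it to a string:
--     for freq in freqToLetter:
--         freqToLetter[freq].sort(key=ETAOIN.find, reverse=True)
--         freqToLetter[freq] = "".join(freqToLetter[freq])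
--
--     # Fourth, convert the freqToLetter dictionary to a list of
--     # tuple pairs (key, value), then sort them:
--     freqPairs = list(freqToLetter.items())
--     freqPairs.sort(key=getItemAtIndexZero, reverse=True)
--
--     # Fifth, now that the letters are ordered by frequency, extract all
--     # the letters for the final string:
--     freqOrder = []
--     for freqPair in freqPairs:
--         freqOrder.append(freqPair[1])
--
--     return "".join(freqOrder)
--
-- def englishFreqMatchScore(message):
--     # Return the number of matches that the string in the message
--     # parameter has when its letter frequency is compared to English
--     # letter frequency. A "match" is how many of its six most frequent
--     # and six least frequent letters is among the six most frequent and
--     # six least frequent letters for English.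
--     freqOrder = getFrequencyOrder(message)
--
--     matchScore = 0
--     # Find how many matches for the six most common letters there are:
--     for commonLetter in ETAOIN[:6]:
--         if commonLetter in freqOrder[:6]:
--             matchScore += 1
--     # Find how many matches for the six least common letters there are:
--     for uncommonLetter in ETAOIN[-6:]:
--         if uncommonLetter in freqOrder[-6:]:
--             matchScore += 1
--
--     return matchScore
-- ===== SOURCE B (Python) =====
-- ETAOIN = "ETAOINSHRDLCUMWFGYPBVKJXQZ"
--
-- LETTERS = "ABCDEFGHIJKLMNOPQRSTUVWXYZ"
--
-- def englishFreqMatchScore(message):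
--     # Count the letters, then obtain the frequency order with ONE sort of the
--     # fixed 26-letter alphabet by the composite key (count, ETAOIN.find(c))
--     # descending, instead of building and sorting frequency buckets.
--     counts = {c: 0 for c in LETTERS}
--     for ch in message.upper():
--         if ch in LETTERS:
--             counts[ch] += 1
--     freqOrder = sorted(LETTERS, key=lambda c: (counts[c], ETAOIN.find(c)), reverse=True)
--     common = sum(1 for c in ETAOIN[:6] if c in freqOrder[:6])
--     rare = sum(1 for c in ETAOIN[-6:] if c in freqOrder[-6:])
--     return common + rare
-- ===== Notes on version B (the rewrite author's own statement) =====
-- stated objective: simpler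
-- what changed: The freqToLetter bucket dictionary, the per-bucket reverse sorts, the items-list sort and the extraction loop are all replaced by ONE sort of the fixed 26-letter alphabet by the composite key (count[c], ETAOIN.find(c)) with reverse=True; the O(n) letter count stays a plain dict loop.
import Mathlib
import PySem

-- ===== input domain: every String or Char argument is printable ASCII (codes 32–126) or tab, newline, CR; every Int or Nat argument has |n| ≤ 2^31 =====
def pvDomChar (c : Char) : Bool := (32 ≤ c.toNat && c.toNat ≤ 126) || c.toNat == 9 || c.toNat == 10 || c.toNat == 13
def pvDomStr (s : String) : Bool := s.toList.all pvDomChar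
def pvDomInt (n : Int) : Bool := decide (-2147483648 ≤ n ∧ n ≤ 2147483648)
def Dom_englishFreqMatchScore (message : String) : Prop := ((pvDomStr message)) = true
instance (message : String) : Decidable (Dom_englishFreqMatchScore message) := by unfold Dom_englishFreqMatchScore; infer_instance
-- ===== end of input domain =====

-- B replaces A's bucket-dictionary / per-bucket-sort / pair-sort pipeline by one composite-key
-- sort of the fixed alphabet (objective: simpler); the letter count and the final score loops stay O(n).

-- ===== PORT A =====
def pyETAOIN : List Char := "ETAOINSHRDLCUMWFGYPBVKJXQZ".toList
def pyLETTERS : List Char := "ABCDEFGHIJKLMNOPQRSTUVWXYZ".toList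

def getLetterCount (message : String) : PySem.Dict Char Int :=
  let letterCount : PySem.Dict Char Int := PySem.Dict.mk
    [('A', 0), ('B', 0), ('C', 0), ('D', 0), ('E', 0), ('F', 0), ('G', 0), ('H', 0), ('I', 0),
     ('J', 0), ('K', 0), ('L', 0), ('M', 0), ('N', 0), ('O', 0), ('P', 0), ('Q', 0), ('R', 0),
     ('S', 0), ('T', 0), ('U', 0), ('V', 0), ('W', 0), ('X', 0), ('Y', 0), ('Z', 0)]
  -- letterCount[letter] += 1: the branch guarantees the key is present, so modify's default is never used
  (PySem.Chars.upper message.toList).foldl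
    (fun d letter =>
      if PySem.Chars.isIn [letter] pyLETTERS then d.modify letter 0 (· + 1) else d)
    letterCount

def getItemAtIndexZero (items : Int × List Char) : Int := items.1

def getFrequencyOrder (message : String) : List Char :=
  let letterToFreq := getLetterCount message
  -- letterToFreq[letter]: every letter of LETTERS is a key of letterToFreq, so getD's default is never used
  let freqToLetter : PySem.Dict Int (List Char) :=
    pyLETTERS.foldl
      (fun d letter =>
        if d.contains (letterToFreq.getD letter 0) = false then
          d.insert (letterToFreq.getD letter 0) [letter]
        else
          d.modify (letterToFreq.getD letter 0) [] (· ++ [letter]))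
      PySem.Dict.empty
  -- third step: each value is sorted in reverse ETAOIN order in place ("".join deferred to the end)
  let freqToLetter2 : PySem.Dict Int (List Char) := PySem.Dict.mk
    (freqToLetter.items.map
      (fun p => (p.1, PySem.List.sorted p.2 (fun c => PySem.Chars.find pyETAOIN [c]) true)))
  let freqPairs := PySem.List.sorted freqToLetter2.items getItemAtIndexZero true
  let freqOrder := freqPairs.foldl (fun acc freqPair => acc ++ [freqPair.2]) []
  PySem.Chars.join [] freqOrder

def englishFreqMatchScore (message : String) : Int :=
  let freqOrder := getFrequencyOrder message
  let matchScore : Int := 0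
  let matchScore := (PySem.List.slice pyETAOIN none (some 6)).foldl
    (fun acc commonLetter =>
      if PySem.Chars.isIn [commonLetter] (PySem.List.slice freqOrder none (some 6))
      then acc + 1 else acc) matchScore
  (PySem.List.slice pyETAOIN (some (-6)) none).foldl
    (fun acc uncommonLetter =>
      if PySem.Chars.isIn [uncommonLetter] (PySem.List.slice freqOrder (some (-6)) none)
      then acc + 1 else acc) matchScore

-- ===== PORT B =====
def englishFreqMatchScore_alt (message : String) : Int :=
  let counts0 : PySem.Dict Char Int := PySem.Dict.ofList (pyLETTERS.map (fun c => (c, 0)))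
  let counts := (PySem.Chars.upper message.toList).foldl
    (fun d ch => if PySem.Chars.isIn [ch] pyLETTERS then d.modify ch 0 (· + 1) else d) counts0
  let freqOrder := PySem.List.sorted2 pyLETTERS
    (fun c => counts.getD c 0) (fun c => PySem.Chars.find pyETAOIN [c]) true
  let common : Int :=
    ((PySem.List.slice pyETAOIN none (some 6)).countP
      (fun c => (PySem.List.slice freqOrder none (some 6)).contains c) : Nat)
  let rare : Int :=
    ((PySem.List.slice pyETAOIN (some (-6)) none).countP
      (fun c => (PySem.List.slice freqOrder (some (-6)) none).contains c) : Nat)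
  common + rare

-- ===== PRECONDITION & SPEC =====
def Spec_englishFreqMatchScore (message : String) (out : Int) : Prop := out = englishFreqMatchScore_alt message
instance (message : String) (out : Int) : Decidable (Spec_englishFreqMatchScore message out) := by unfold Spec_englishFreqMatchScore; infer_instance

-- ===== CLAIM (what is proved, stated in full; the proofs are below) =====
def Claim_equal_englishFreqMatchScore : Prop := ∀ (message : String), Dom_englishFreqMatchScore message → Spec_englishFreqMatchScore message (englishFreqMatchScore message)

-- ===== LEMMAS AND PROOFS =====

-- the second component of B's composite sort key / A's per-bucket sort key
def etaKey (c : Char) : Int := PySem.Chars.find pyETAOIN [c]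

-- single integer key equivalent to the (count, etaKey) lexicographic pair (etaKey ranges over [-1, 26])
def comboKey (d : PySem.Dict Char Int) (c : Char) : Int := 28 * d.getD c 0 + etaKey c

theorem etaKey_bounds (c : Char) : -1 ≤ etaKey c ∧ etaKey c ≤ 26 := by
  refine ⟨PySem.Chars.neg_one_le_find _ _, ?_⟩
  have h := PySem.Chars.find_le_length pyETAOIN [c]
  simpa [pyETAOIN] using h
set_option maxRecDepth 8000 in
theorem etaKey_map_nodup : (pyLETTERS.map etaKey).Nodup := by decide
theorem etaKey_inj : ∀ a ∈ pyLETTERS, ∀ b ∈ pyLETTERS, etaKey a = etaKey b → a = b := by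
  exact fun a ha b hb h => List.inj_on_of_nodup_map etaKey_map_nodup ha hb h

-- the per-letter bucket of A's freqToLetter dictionary
def bucketOf (d : PySem.Dict Char Int) (f : Int) : List Char :=
  pyLETTERS.filter (fun l => d.getD l 0 == f)

theorem join_nil_eq_flatten (L : List (List Char)) : PySem.Chars.join [] L = L.flatten := by
  induction L with
  | nil => simp [PySem.Chars.join_nil]
  | cons a t ih =>
    cases t with
    | nil => simp [PySem.Chars.join_singleton]
    | cons b t2 => rw [PySem.Chars.join_cons_cons]; simp [ih]


-- the central fact, with the freqToLetter dictionary abstracted (keeps elaboration cheap)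
theorem sort_flatten (d : PySem.Dict Char Int) (F : PySem.Dict Int (List Char))
    (hFget : ∀ f : Int, F.getD f [] = bucketOf d f)
    (hknd : F.keys.Nodup)
    (hkmem : ∀ x ∈ pyLETTERS, d.getD x 0 ∈ F.keys) :
    PySem.Chars.join []
      ((PySem.List.sorted (F.items.map
          (fun p => (p.1, PySem.List.sorted p.2 (fun c => PySem.Chars.find pyETAOIN [c]) true)))
        getItemAtIndexZero true).foldl (fun acc freqPair => acc ++ [freqPair.2]) [])
      = PySem.List.sorted pyLETTERS (comboKey d) true := by
  have hitem : ∀ p ∈ F.items, p.2 = bucketOf d p.1 := by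
    intro p hp
    have := PySem.Dict.getD_of_mem_items F (k := p.1) (v := p.2) hp hknd []
    rw [← this, hFget]
  set items2 : List (Int × List Char) := F.items.map
      (fun p => (p.1, PySem.List.sorted p.2 (fun c => PySem.Chars.find pyETAOIN [c]) true)) with hitems2
  set freqPairs := PySem.List.sorted items2 getItemAtIndexZero true with hfp
  have hfp_perm : freqPairs.Perm items2 := by
    rw [hfp]; exact PySem.List.sorted_perm _ _ _
  have hfp_item : ∀ p ∈ freqPairs, p.2 = PySem.List.sorted (bucketOf d p.1) etaKey true := by
    intro p hp
    have hp2 : p ∈ items2 := hfp_perm.mem_iff.mp hp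
    rw [hitems2] at hp2
    rcases List.mem_map.mp hp2 with ⟨q, hq, rfl⟩
    simp only []
    rw [← hitem q hq]
    rfl
  have hnd2 : (items2.map (fun p => p.1)).Nodup := by
    have : items2.map (fun p => p.1) = F.items.map (fun p => p.1) := by
      rw [hitems2, List.map_map]; rfl
    rw [this]
    exact hknd
  have hfp_nd : (freqPairs.map (fun p => p.1)).Nodup := ((hfp_perm.map _).nodup_iff).mpr hnd2
  have hfp_lt : freqPairs.Pairwise (fun p q => q.1 < p.1) := by
    have hle : freqPairs.Pairwise (fun p q => getItemAtIndexZero q ≤ getItemAtIndexZero p) := by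
      rw [hfp]; exact PySem.List.sorted_pairwise_rev _ _
    have hne : freqPairs.Pairwise (fun p q => p.1 ≠ q.1) := List.pairwise_map.mp hfp_nd
    exact (hle.and hne).imp (fun h => lt_of_le_of_ne h.1 (fun e => h.2 e.symm))
  -- bucket facts
  have hbmem : ∀ f : Int, ∀ x ∈ PySem.List.sorted (bucketOf d f) etaKey true,
      d.getD x 0 = f ∧ x ∈ pyLETTERS := by
    intro f x hx
    have hx2 : x ∈ bucketOf d f := (PySem.List.mem_sorted _ _ _ _).mp hx
    have := List.mem_filter.mp hx2
    exact ⟨by simpa using this.2, this.1⟩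
  have hbnodup : ∀ f : Int, (PySem.List.sorted (bucketOf d f) etaKey true).Nodup := by
    intro f
    exact (PySem.List.sorted_perm _ _ _).symm.nodup
      (List.Nodup.filter _ (by decide : pyLETTERS.Nodup))
  have hbpw : ∀ f : Int, (PySem.List.sorted (bucketOf d f) etaKey true).Pairwise
      (fun a b => etaKey b < etaKey a) := by
    intro f
    have hle := PySem.List.sorted_pairwise_rev (bucketOf d f) etaKey
    have hne : (PySem.List.sorted (bucketOf d f) etaKey true).Pairwise (fun a b => a ≠ b) :=
      (hbnodup f)
    refine (hle.and hne).imp_of_mem ?_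
    intro a b ha hb h
    rcases h with ⟨h1, h2⟩
    rcases lt_or_eq_of_le h1 with h | h
    · exact h
    · exact absurd (etaKey_inj b (hbmem f b hb).2 a (hbmem f a ha).2 h) (fun e => h2 e.symm)
  -- the flattened result
  have hfold : freqPairs.foldl (fun acc freqPair => acc ++ [freqPair.2]) [] =
      freqPairs.map (fun p => p.2) := by
    simpa using PySem.List.foldl_append_singleton_eq_map (l := freqPairs) (f := fun p => p.2) (acc := [])
  rw [hfold, join_nil_eq_flatten]
  -- membership
  have hmem : ∀ x, x ∈ (freqPairs.map (fun p => p.2)).flatten ↔ x ∈ pyLETTERS := by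
    intro x
    constructor
    · intro hx
      rcases List.mem_flatten.mp hx with ⟨l, hl, hxl⟩
      rcases List.mem_map.mp hl with ⟨p, hp, rfl⟩
      rw [hfp_item p hp] at hxl
      exact (hbmem p.1 x hxl).2
    · intro hx
      have : d.getD x 0 ∈ F.items.map (fun p => p.1) := hkmem x hx
      rcases List.mem_map.mp this with ⟨q, hq, hq1⟩
      have hq2 : (q.1, PySem.List.sorted q.2 (fun c => PySem.Chars.find pyETAOIN [c]) true) ∈ items2 :=
        List.mem_map.mpr ⟨q, hq, rfl⟩
      have hqfp : (q.1, PySem.List.sorted q.2 (fun c => PySem.Chars.find pyETAOIN [c]) true) ∈ freqPairs :=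
        hfp_perm.mem_iff.mpr hq2
      refine List.mem_flatten.mpr ⟨PySem.List.sorted q.2 (fun c => PySem.Chars.find pyETAOIN [c]) true,
        List.mem_map.mpr ⟨_, hqfp, rfl⟩, ?_⟩
      have hxb : x ∈ bucketOf d q.1 := List.mem_filter.mpr ⟨hx, by simp [hq1]⟩
      rw [hitem q hq]
      exact (PySem.List.mem_sorted _ _ _ _).mpr hxb
  -- nodup
  have hnodup : (freqPairs.map (fun p => p.2)).flatten.Nodup := by
    rw [List.nodup_flatten]
    constructor
    · intro l hl
      rcases List.mem_map.mp hl with ⟨p, hp, rfl⟩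
      rw [hfp_item p hp]; exact hbnodup p.1
    · rw [List.pairwise_map]
      refine hfp_lt.imp_of_mem ?_
      intro p q hp hq hlt
      rw [hfp_item p hp, hfp_item q hq]
      intro x hxp hxq
      exact absurd ((hbmem p.1 x hxp).1 ▸ (hbmem q.1 x hxq).1)
        (by intro e; omega)
  -- strictly descending in the combined key
  have hpw : (freqPairs.map (fun p => p.2)).flatten.Pairwise
      (fun a b => comboKey d b < comboKey d a) := by
    rw [List.pairwise_flatten]
    constructor
    · intro l hl
      rcases List.mem_map.mp hl with ⟨p, hp, rfl⟩
      rw [hfp_item p hp]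
      refine (hbpw p.1).imp_of_mem ?_
      intro a b ha hb h
      have h1 := (hbmem p.1 a ha).1
      have h2 := (hbmem p.1 b hb).1
      simp only [comboKey]
      omega
    · rw [List.pairwise_map]
      refine hfp_lt.imp_of_mem ?_
      intro p q hp hq hlt x hxp y hyq
      rw [hfp_item p hp] at hxp
      rw [hfp_item q hq] at hyq
      have h1 := (hbmem p.1 x hxp).1
      have h2 := (hbmem q.1 y hyq).1
      have b1 := etaKey_bounds x
      have b2 := etaKey_bounds y
      simp only [comboKey]
      omega
  have hperm : (freqPairs.map (fun p => p.2)).flatten.Perm pyLETTERS :=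
    (List.perm_ext_iff_of_nodup hnodup (by decide)).mpr hmem
  exact (PySem.List.sorted_rev_eq_of_perm_of_pairwise_gt pyLETTERS _ (comboKey d) hperm hpw).symm

-- B's composite two-key reverse sort is the reverse sort by the single combined key
theorem sorted2_eq_sorted_combo (d : PySem.Dict Char Int) :
    PySem.List.sorted2 pyLETTERS (fun c => d.getD c 0) (fun c => PySem.Chars.find pyETAOIN [c]) true
      = PySem.List.sorted pyLETTERS (comboKey d) true := by
  rw [PySem.List.sorted_rev_eq_foldl_insertBy]
  show List.foldl (fun acc x => PySem.List.insertBy (fun a b =>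
      decide (d.getD b 0 < d.getD a 0) || (!decide (d.getD a 0 < d.getD b 0) &&
        decide (PySem.Chars.find pyETAOIN [b] < PySem.Chars.find pyETAOIN [a]))) x acc) [] pyLETTERS = _
  congr 1
  funext acc x
  congr 1
  funext a b
  have ha := etaKey_bounds a
  have hb := etaKey_bounds b
  simp only [comboKey, etaKey] at *
  by_cases h1 : d.getD b 0 < d.getD a 0 <;>
    by_cases h2 : d.getD a 0 < d.getD b 0 <;>
      by_cases h3 : PySem.Chars.find pyETAOIN [b] < PySem.Chars.find pyETAOIN [a] <;>
        simp [h1, h2, h3] <;> omega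

-- A's whole bucket pipeline produces exactly the combined-key reverse sort of the alphabet
set_option maxHeartbeats 1600000 in
theorem getFrequencyOrder_eq (message : String) :
    getFrequencyOrder message
      = PySem.List.sorted pyLETTERS (comboKey (getLetterCount message)) true := by
  unfold getFrequencyOrder
  simp only []
  set d := getLetterCount message with hd
  set F : PySem.Dict Int (List Char) :=
    pyLETTERS.foldl
      (fun dd letter =>
        if dd.contains (d.getD letter 0) = false then
          dd.insert (d.getD letter 0) [letter]
        else
          dd.modify (d.getD letter 0) [] (· ++ [letter]))
      PySem.Dict.empty with hFdef
  have hF : F = (pyLETTERS.map (fun l => (d.getD l 0, l))).foldl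
      (fun dd p => dd.modify p.1 [] (· ++ [p.2])) PySem.Dict.empty := by
    rw [hFdef, List.foldl_map]
    apply PySem.List.foldl_congr_mem
    intro acc x _
    by_cases h : acc.contains (d.getD x 0) = false
    · simp [h, PySem.Dict.modify, PySem.Dict.getD_of_not_contains _ _ h]
    · simp [h]
  have hFget : ∀ f : Int, F.getD f [] = bucketOf d f := by
    intro f
    rw [hF, PySem.Dict.getD_foldl_modify_append]
    simp [List.filter_map, bucketOf, Function.comp_def]
  have hknd : F.keys.Nodup := by
    rw [hF]
    exact PySem.Dict.nodup_keys_foldl_modify_key _ Prod.fst [] (fun dd p => (· ++ [p.2])) _ (by simp)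
  have hkmem : ∀ x ∈ pyLETTERS, d.getD x 0 ∈ F.keys := by
    intro x hx
    rw [hF, PySem.Dict.keys_foldl_modify_key _ Prod.fst [] (fun dd p => (· ++ [p.2])), List.map_map]
    have hc : (Prod.fst ∘ fun l : Char => (d.getD l 0, l)) = fun l => d.getD l 0 := rfl
    rw [hc]
    simp only [PySem.Dict.keys_empty, PySem.Set.update_nil_left]
    exact (PySem.Set.mem_ofList _ _).mpr (List.mem_map.mpr ⟨x, hx, rfl⟩)
  exact sort_flatten d F hFget hknd hkmem

-- 'c in s' on a one-character string is list membership
theorem isIn_singleton_eq_contains (l s : List Char) :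
    l.countP (fun c => PySem.Chars.isIn [c] s) = l.countP (fun c => s.contains c) := by
  refine List.countP_congr ?_
  intro c _
  simp [PySem.Chars.isIn_iff_infix, List.singleton_infix_iff]

-- B's dict-comprehension initial dictionary is A's literal one
theorem init_counts_eq :
    PySem.Dict.ofList (pyLETTERS.map (fun c => (c, (0 : Int)))) = PySem.Dict.mk
      [('A', 0), ('B', 0), ('C', 0), ('D', 0), ('E', 0), ('F', 0), ('G', 0), ('H', 0), ('I', 0),
       ('J', 0), ('K', 0), ('L', 0), ('M', 0), ('N', 0), ('O', 0), ('P', 0), ('Q', 0), ('R', 0),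
       ('S', 0), ('T', 0), ('U', 0), ('V', 0), ('W', 0), ('X', 0), ('Y', 0), ('Z', 0)] := by
  decide

-- ===== VERDICT (by name: the statement is the Claim_ definition above) =====
theorem englishFreqMatchScore_spec : Claim_equal_englishFreqMatchScore := by
  intro message _
  unfold Spec_englishFreqMatchScore englishFreqMatchScore englishFreqMatchScore_alt
  simp only []
  rw [getFrequencyOrder_eq, init_counts_eq]
  have hcounts : (PySem.Chars.upper message.toList).foldl
      (fun d ch => if PySem.Chars.isIn [ch] pyLETTERS then d.modify ch 0 (· + 1) else d)
      (PySem.Dict.mk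
        [('A', 0), ('B', 0), ('C', 0), ('D', 0), ('E', 0), ('F', 0), ('G', 0), ('H', 0), ('I', 0),
         ('J', 0), ('K', 0), ('L', 0), ('M', 0), ('N', 0), ('O', 0), ('P', 0), ('Q', 0), ('R', 0),
         ('S', 0), ('T', 0), ('U', 0), ('V', 0), ('W', 0), ('X', 0), ('Y', 0), ('Z', 0)])
      = getLetterCount message := rfl
  rw [hcounts, sorted2_eq_sorted_combo]
  rw [PySem.List.foldl_if_add_one, PySem.List.foldl_if_add_one]
  rw [isIn_singleton_eq_contains, isIn_singleton_eq_contains]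
  omega
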